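-- pv_equiv track=rewrite | github.com/nikett/deep_qa | deep_qa/data/instances/text_classification/frame_instance.py | dense_frame_from
-- ===== SOURCE A (Python) =====
-- from typing import Dict, List
--
-- SLOTNAMES_ORDERED = ["agent", "beneficiary", "causer", "context", "definition", "event",
--                      "finalloc", "headverb", "initloc", "input", "output", "manner",
--                      "patient", "resultant", "timebegin", "timeend", "temporal", "hierarchical",
--                      "similar", "contemporary", "enables", "mechanism", "condition", "purpose",
--                      "cause", "openrel", "participant"]
--
-- UNKNOWN_SLOTVAL = "unk"  # making an open world assumption, we do not observe all the values
--
-- QUES_SLOTVAL = "ques"  # this slot in the frame must be queried/completed.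
--
-- def dense_frame_from(sparse_frame: Dict[str, str],
--                      query_slotname: str):
--     """
--     Performs two types of padding:
--     i) unobserved slots are filled with self.unknown_slotval
--     ii) query slot is masked with self.unknown_queryval
--     The order of slots strictly follows from SLOTNAMES_ORDERED.
--     :param sparse_frame:
--             slotnames -> slot phrase [event -> plant absorb water , participant -> water]
--     :param query_slotname:
--             participant
--     :return: [plant absorb water, ques, unk, unk, ...]
--     """
--     slots = []
--     for slotname in SLOTNAMES_ORDERED:
--         if slotname == query_slotname:  # query hence masked
--             slots.append(QUES_SLOTVAL)
--         elif slotname in sparse_frame:  # observed hence as-is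
--             slots.append(sparse_frame[slotname])
--         else:  # unobserved hence inserted
--             slots.append(UNKNOWN_SLOTVAL)
--     return slots
-- ===== SOURCE B (Python) =====
-- SLOTNAMES_ORDERED = ["agent", "beneficiary", "causer", "context", "definition", "event",
--                      "finalloc", "headverb", "initloc", "input", "output", "manner",
--                      "patient", "resultant", "timebegin", "timeend", "temporal", "hierarchical",
--                      "similar", "contemporary", "enables", "mechanism", "condition", "purpose",
--                      "cause", "openrel", "participant"]
--
-- UNKNOWN_SLOTVAL = "unk"
--
-- QUES_SLOTVAL = "ques"
--
--
-- def dense_frame_from(sparse_frame, query_slotname):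
--     """Scatter the observed values into a pre-padded slot list, then mask the query."""
--     position = {name: i for i, name in enumerate(SLOTNAMES_ORDERED)}
--     result = [UNKNOWN_SLOTVAL] * len(SLOTNAMES_ORDERED)
--     for name, value in sparse_frame.items():
--         i = position.get(name)
--         if i is not None:
--             result[i] = value
--     i = position.get(query_slotname)
--     if i is not None:
--         result[i] = QUES_SLOTVAL
--     return result
-- ===== Notes on version B (the rewrite author's own statement) =====
-- stated objective: alternative
-- what changed: B scatters: it builds a name-to-position index, pre-fills a 27-slot list with 'unk', writes each sparse item into its slot, then overwrites the query slot with 'ques', instead of A's gather loop that tests every ordered slot name against the query and the dict.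
import Mathlib
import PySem

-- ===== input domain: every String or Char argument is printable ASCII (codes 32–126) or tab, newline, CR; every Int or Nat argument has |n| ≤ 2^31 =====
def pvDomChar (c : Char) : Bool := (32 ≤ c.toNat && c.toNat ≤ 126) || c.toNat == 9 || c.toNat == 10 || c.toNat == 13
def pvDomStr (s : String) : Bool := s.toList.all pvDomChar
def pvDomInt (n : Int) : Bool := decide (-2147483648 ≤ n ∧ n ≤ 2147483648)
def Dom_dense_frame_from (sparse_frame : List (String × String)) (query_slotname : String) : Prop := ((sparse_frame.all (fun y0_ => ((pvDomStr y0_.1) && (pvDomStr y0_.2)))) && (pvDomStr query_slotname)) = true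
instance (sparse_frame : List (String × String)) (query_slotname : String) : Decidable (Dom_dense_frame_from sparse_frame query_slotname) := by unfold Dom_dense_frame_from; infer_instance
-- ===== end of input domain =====

-- B scatters the sparse items through a position index into a pre-padded list instead of
-- scanning the dict once per ordered slot name (objective: alternative decomposition, same cost).
-- ===== PORT A =====
def SLOTNAMES_ORDERED : List String :=
  ["agent", "beneficiary", "causer", "context", "definition", "event",
   "finalloc", "headverb", "initloc", "input", "output", "manner",
   "patient", "resultant", "timebegin", "timeend", "temporal", "hierarchical",
   "similar", "contemporary", "enables", "mechanism", "condition", "purpose",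
   "cause", "openrel", "participant"]

def UNKNOWN_SLOTVAL : String := "unk"

def QUES_SLOTVAL : String := "ques"

def dense_frame_from (sparse_frame : List (String × String)) (query_slotname : String) : List String :=
  SLOTNAMES_ORDERED.foldl (fun slots slotname =>
    if slotname == query_slotname then
      slots ++ [QUES_SLOTVAL]
    else
      -- 'slotname in sparse_frame' then 'sparse_frame[slotname]': first-match dict lookup, exact
      match (PySem.Dict.mk sparse_frame).get? slotname with
      | some v => slots ++ [v]
      | none => slots ++ [UNKNOWN_SLOTVAL]) []

-- ===== PORT B =====
-- {name: i for i, name in enumerate(SLOTNAMES_ORDERED)}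
def slotPosition : PySem.Dict String Int :=
  PySem.Dict.ofList ((PySem.List.enumerate SLOTNAMES_ORDERED).map (fun p => (p.2, (p.1 : Int))))

def dense_frame_from_alt (sparse_frame : List (String × String)) (query_slotname : String) : List String :=
  let result := List.replicate SLOTNAMES_ORDERED.length UNKNOWN_SLOTVAL
  let result := sparse_frame.foldl (fun r p =>
    match slotPosition.get? p.1 with
    | some i => r.set i.toNat p.2
    | none => r) result
  match slotPosition.get? query_slotname with
  | some i => result.set i.toNat QUES_SLOTVAL
  | none => result

-- ===== PRECONDITION & SPEC =====
-- Pre_ admits exactly the association lists with pairwise-distinct keys: the Python argument is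
-- a dict, and only such lists represent one (no input A accepts is excluded).
def Pre_dense_frame_from (sparse_frame : List (String × String)) (query_slotname : String) : Prop :=
  (sparse_frame.map Prod.fst).Nodup
instance (sparse_frame : List (String × String)) (query_slotname : String) : Decidable (Pre_dense_frame_from sparse_frame query_slotname) := by unfold Pre_dense_frame_from; infer_instance

def pvWitness_dense_frame_from : (List (String × String)) × String :=
  ([("event", "plant absorb water"), ("participant", "water")], "participant")

def Spec_dense_frame_from (sparse_frame : List (String × String)) (query_slotname : String) (out : List String) : Prop := out = dense_frame_from_alt sparse_frame query_slotname
instance (sparse_frame : List (String × String)) (query_slotname : String) (out : List String) : Decidable (Spec_dense_frame_from sparse_frame query_slotname out) := by unfold Spec_dense_frame_from; infer_instance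

-- ===== CLAIM (what is proved, stated in full; the proofs are below) =====
def Claim_equal_dense_frame_from : Prop := ∀ (sparse_frame : List (String × String)) (query_slotname : String), Dom_dense_frame_from sparse_frame query_slotname → Pre_dense_frame_from sparse_frame query_slotname → Spec_dense_frame_from sparse_frame query_slotname (dense_frame_from sparse_frame query_slotname)

-- ===== LEMMAS AND PROOFS =====

-- the value A appends for one slot name
def slotValA (sparse_frame : List (String × String)) (query_slotname slotname : String) : String :=
  if slotname == query_slotname then QUES_SLOTVAL
  else
    match (PySem.Dict.mk sparse_frame).get? slotname with
    | some v => v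
    | none => UNKNOWN_SLOTVAL

theorem denseA_eq_map (sparse_frame : List (String × String)) (query_slotname : String) :
    dense_frame_from sparse_frame query_slotname
      = SLOTNAMES_ORDERED.map (slotValA sparse_frame query_slotname) := by
  unfold dense_frame_from
  have h : (fun (slots : List String) slotname =>
      if slotname == query_slotname then slots ++ [QUES_SLOTVAL]
      else
        match (PySem.Dict.mk sparse_frame).get? slotname with
        | some v => slots ++ [v]
        | none => slots ++ [UNKNOWN_SLOTVAL])
      = (fun slots sn => slots ++ [slotValA sparse_frame query_slotname sn]) := by
    funext slots sn
    unfold slotValA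
    split_ifs with h
    · rfl
    · cases (PySem.Dict.mk sparse_frame).get? sn <;> rfl
  rw [h, PySem.List.foldl_append_singleton_eq_map]
  simp

theorem get?_mk_eq_find? {ν : Type} (l : List (String × ν)) (k : String) :
    (PySem.Dict.mk l).get? k = (l.find? (fun p => p.1 == k)).map Prod.snd := by
  induction l with
  | nil => rfl
  | cons hd tl ih =>
      cases hd with
      | mk k0 v0 =>
          rw [PySem.Dict.get?_mk_cons, List.find?_cons]
          by_cases h : (k0 == k) = true <;> simp [h, ih]

set_option maxHeartbeats 1000000 in
theorem slotPosition_eq : slotPosition = PySem.Dict.mk [("agent", 0), ("beneficiary", 1), ("causer", 2), ("context", 3), ("definition", 4), ("event", 5), ("finalloc", 6), ("headverb", 7), ("initloc", 8), ("input", 9), ("output", 10), ("manner", 11), ("patient", 12), ("resultant", 13), ("timebegin", 14), ("timeend", 15), ("temporal", 16), ("hierarchical", 17), ("similar", 18), ("contemporary", 19), ("enables", 20), ("mechanism", 21), ("condition", 22), ("purpose", 23), ("cause", 24), ("openrel", 25), ("participant", 26)] := by rfl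

theorem pos_some {k : String} {i : Int} (h : slotPosition.get? k = some i) :
    0 ≤ i ∧ i.toNat < 27 ∧ SLOTNAMES_ORDERED.getD i.toNat "" = k := by
  rw [slotPosition_eq, get?_mk_eq_find?] at h
  obtain ⟨p, hp, hpi⟩ := Option.map_eq_some_iff.mp h
  have hk := List.find?_some hp
  have hmem := List.mem_of_find?_eq_some hp
  subst hpi
  simp only [List.mem_cons, List.not_mem_nil, or_false] at hmem
  rcases hmem with rfl|rfl|rfl|rfl|rfl|rfl|rfl|rfl|rfl|rfl|rfl|rfl|rfl|rfl|rfl|rfl|rfl|rfl|rfl|rfl|rfl|rfl|rfl|rfl|rfl|rfl|rfl <;>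
    exact ⟨by decide, by decide, beq_iff_eq.mp hk⟩

theorem pos_getD {j : Nat} (hj : j < 27) :
    slotPosition.get? (SLOTNAMES_ORDERED.getD j "") = some (j : Int) := by
  rw [slotPosition_eq]
  interval_cases j <;> rfl

theorem pred_eq {j : Nat} (hj : j < 27) (k : String) :
    ((slotPosition.get? k).map Int.toNat == some j) = (k == SLOTNAMES_ORDERED.getD j "") := by
  cases hg : slotPosition.get? k with
  | none =>
      simp only [Option.map_none]
      rw [show ((none : Option Nat) == some j) = false from rfl]
      rw [eq_comm, beq_eq_false_iff_ne]
      intro rfl_h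
      rw [rfl_h, pos_getD hj] at hg
      exact absurd hg (by simp)
  | some i =>
      simp only [Option.map_some]
      rw [Bool.eq_iff_iff]
      simp only [beq_iff_eq, Option.some.injEq]
      constructor
      · intro hij
        obtain ⟨_, _, hk⟩ := pos_some hg
        rw [← hk, hij]
      · intro hk
        rw [hk] at hg
        rw [pos_getD hj] at hg
        cases hg
        simp

theorem fold_len (sf : List (String × String)) (acc : List String) :
    (sf.foldl (fun r p =>
        match slotPosition.get? p.1 with
        | some i => r.set i.toNat p.2
        | none => r) acc).length = acc.length := by
  induction sf generalizing acc with
  | nil => rfl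
  | cons hd tl ih =>
      rw [List.foldl_cons]
      cases h : slotPosition.get? hd.1 <;> simp only [h] <;> rw [ih] <;> simp

theorem fold_get (sf : List (String × String)) (acc : List String)
    (hnd : (sf.map Prod.fst).Nodup) (j : Nat) (hja : j < acc.length) :
    (sf.foldl (fun r p =>
        match slotPosition.get? p.1 with
        | some i => r.set i.toNat p.2
        | none => r) acc)[j]?
      = match sf.find? (fun p => (slotPosition.get? p.1).map Int.toNat == some j) with
        | some p => some p.2
        | none => acc[j]? := by
  induction sf generalizing acc with
  | nil => rfl
  | cons hd tl ih =>
      simp only [List.map_cons, List.nodup_cons] at hnd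
      rw [List.foldl_cons, List.find?_cons]
      cases hg : slotPosition.get? hd.1 with
      | none =>
          simp only [hg, Option.map_none]
          rw [show ((none : Option Nat) == some j) = false from rfl]
          exact ih acc hnd.2 hja
      | some i =>
          simp only [hg, Option.map_some]
          by_cases hij : i.toNat = j
          · rw [show ((some i.toNat == some j)) = true by simp [hij]]
            subst hij
            rw [ih (acc.set i.toNat hd.2) hnd.2 (by simpa using hja)]
            have hnone : tl.find? (fun p => (slotPosition.get? p.1).map Int.toNat == some i.toNat) = none := by
              rw [List.find?_eq_none]
              intro p hp
              simp only [beq_iff_eq, Bool.not_eq_true]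
              cases hg' : slotPosition.get? p.1 with
              | none => simp
              | some i' =>
                  simp only [Option.map_some, Option.some.injEq]
                  intro heq
                  obtain ⟨_, _, hk'⟩ := pos_some hg'
                  obtain ⟨_, _, hk⟩ := pos_some hg
                  rw [heq] at hk'
                  rw [hk] at hk'
                  exact hnd.1 (hk' ▸ List.mem_map_of_mem hp)
            rw [hnone]
            rw [List.getElem?_set_self]
            simp [hja]
          · rw [show ((some i.toNat == some j)) = false by simp [hij]]
            rw [ih (acc.set i.toNat hd.2) hnd.2 (by simpa using hja)]
            rw [List.getElem?_set_ne hij]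

-- ===== VERDICT (by name: the statement is the Claim_ definition above) =====
theorem dense_frame_from_spec : Claim_equal_dense_frame_from := by
  intro sf qs _hdom hpre
  unfold Spec_dense_frame_from
  rw [denseA_eq_map]
  unfold dense_frame_from_alt
  dsimp only
  apply List.ext_getElem?
  intro j
  have hlen : (List.replicate SLOTNAMES_ORDERED.length UNKNOWN_SLOTVAL).length = 27 := by simp [SLOTNAMES_ORDERED]
  by_cases hj : j < 27
  · -- in range
    have hja : j < (List.replicate SLOTNAMES_ORDERED.length UNKNOWN_SLOTVAL).length := by omega
    have hB0 := fold_get sf (List.replicate SLOTNAMES_ORDERED.length UNKNOWN_SLOTVAL) hpre j hja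
    have hBlen : (sf.foldl (fun r p =>
        match slotPosition.get? p.1 with
        | some i => r.set i.toNat p.2
        | none => r) (List.replicate SLOTNAMES_ORDERED.length UNKNOWN_SLOTVAL)).length = 27 := by
      rw [fold_len]; exact hlen
    set name := SLOTNAMES_ORDERED.getD j "" with hname
    have hAj : (SLOTNAMES_ORDERED.map (slotValA sf qs))[j]? = some (slotValA sf qs name) := by
      rw [List.getElem?_map]
      have : SLOTNAMES_ORDERED[j]? = some name := by
        rw [hname, List.getD_eq_getElem?_getD, List.getElem?_eq_getElem (by simpa [SLOTNAMES_ORDERED] using hj)]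
        rfl
      rw [this]; rfl
    rw [hAj]
    -- predicate rewrite in hB0
    have hpred : (fun (p : String × String) => (slotPosition.get? p.1).map Int.toNat == some j)
        = (fun p => p.1 == name) := by
      funext p; exact pred_eq hj p.1
    rw [hpred] at hB0
    have hB0' : (sf.foldl (fun r p =>
        match slotPosition.get? p.1 with
        | some i => r.set i.toNat p.2
        | none => r) (List.replicate SLOTNAMES_ORDERED.length UNKNOWN_SLOTVAL))[j]?
        = some (match (PySem.Dict.mk sf).get? name with
                | some v => v
                | none => UNKNOWN_SLOTVAL) := by
      rw [hB0, get?_mk_eq_find?]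
      cases hf : sf.find? (fun p => p.1 == name) with
      | some p => rfl
      | none => simp [List.getElem?_replicate, hja, hlen, hj]
    cases hq : slotPosition.get? qs with
    | some i =>
        dsimp only
        by_cases hij : i.toNat = j
        · -- query masks this slot
          have hqs : qs = name := by
            obtain ⟨_, _, hk⟩ := pos_some hq
            rw [← hk, hij]
          rw [hij, List.getElem?_set_self (by rw [hBlen]; exact hj)]
          unfold slotValA
          rw [if_pos (by simp [hqs])]
        · have hne : (name == qs) = false := by
            rw [beq_eq_false_iff_ne]
            intro hnq
            rw [← hnq, pos_getD hj] at hq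
            cases hq
            exact hij (by simp)
          rw [List.getElem?_set_ne hij, hB0']
          unfold slotValA
          rw [if_neg (by simp [beq_eq_false_iff_ne.mp hne])]
    | none =>
        have hne : (name == qs) = false := by
          rw [beq_eq_false_iff_ne]
          intro hnq
          rw [← hnq, pos_getD hj] at hq
          exact absurd hq (by simp)
        dsimp only
        rw [hB0']
        unfold slotValA
        rw [if_neg (by simp [beq_eq_false_iff_ne.mp hne])]
  · -- out of range: both none
    have hA : (SLOTNAMES_ORDERED.map (slotValA sf qs))[j]? = none := by
      rw [List.getElem?_eq_none]
      simp [SLOTNAMES_ORDERED]; omega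
    have hBlen : (sf.foldl (fun r p =>
        match slotPosition.get? p.1 with
        | some i => r.set i.toNat p.2
        | none => r) (List.replicate SLOTNAMES_ORDERED.length UNKNOWN_SLOTVAL)).length = 27 := by
      rw [fold_len]; exact hlen
    rw [hA]
    cases hq : slotPosition.get? qs with
    | some i =>
        dsimp only
        exact (List.getElem?_eq_none (by simp [hBlen]; omega)).symm
    | none =>
        dsimp only
        exact (List.getElem?_eq_none (by rw [hBlen]; omega)).symm
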